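-- pv_equiv track=rewrite | github.com/kenzo-staelens/aoc | day14/day14.py | calc_part_1_line
-- ===== SOURCE A (Python) =====
-- def calc_part_1_line(line,length):
--     sum = 0
--     rock_at=length
--     for i,item in enumerate(line):
--         if item=="#":
--             rock_at=length-1-i
--             continue
--         if item=="O":
--             sum+=rock_at
--             rock_at-=1
--     return sum
-- ===== SOURCE B (Python) =====
-- def calc_part_1_line(line, length):
--     total = 0
--     s = 0
--     c = 0
--     for i, ch in enumerate(line):
--         if ch == "#":
--             total += c * (length - s) - c * (c - 1) // 2
--             s = i + 1
--             c = 0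
--         elif ch == "O":
--             c += 1
--     return total + c * (length - s) - c * (c - 1) // 2
-- ===== Notes on version B (the rewrite author's own statement) =====
-- stated objective: alternative
-- what changed: A simulates each rock's landing position with a running rock_at counter updated per character; B instead counts the 'O's per wall-delimited segment and adds the closed-form arithmetic series c*(length-s) - c*(c-1)//2 when a segment is flushed (at each '#' and at the end).
import Mathlib
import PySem

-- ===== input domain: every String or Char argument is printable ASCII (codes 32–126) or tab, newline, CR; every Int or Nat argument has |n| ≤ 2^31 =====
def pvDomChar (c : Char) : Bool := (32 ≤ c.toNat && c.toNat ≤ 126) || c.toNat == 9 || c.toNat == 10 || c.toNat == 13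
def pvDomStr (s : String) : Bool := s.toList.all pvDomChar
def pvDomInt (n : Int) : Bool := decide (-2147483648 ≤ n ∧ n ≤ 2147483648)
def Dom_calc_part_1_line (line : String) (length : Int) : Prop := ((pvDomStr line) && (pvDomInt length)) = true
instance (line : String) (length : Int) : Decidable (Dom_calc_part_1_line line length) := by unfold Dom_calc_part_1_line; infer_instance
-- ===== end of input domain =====

-- B replaces A's per-character rock_at simulation by a per-segment O-count flushed with a
-- closed-form arithmetic series at each '#' and at the end (alternative decomposition, same cost).

-- ===== PORT A =====
def calc_part_1_line (line : String) (length : Int) : Int :=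
  ((PySem.List.enumerate line.toList 0).foldl
    (fun (st : Int × Int) p =>
      if p.2 == '#' then
        (st.1, length - 1 - p.1)
      else if p.2 == 'O' then
        (st.1 + st.2, st.2 - 1)
      else st)
    (0, length)).1

-- ===== PORT B =====
def calc_part_1_line_alt (line : String) (length : Int) : Int :=
  let st := (PySem.List.enumerate line.toList 0).foldl
    (fun (st : Int × Int × Int) p =>
      if p.2 == '#' then
        (st.1 + st.2.2 * (length - st.2.1) - PySem.Int.floordiv (st.2.2 * (st.2.2 - 1)) 2,
         p.1 + 1, 0)
      else if p.2 == 'O' then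
        (st.1, st.2.1, st.2.2 + 1)
      else st)
    (0, 0, 0)
  st.1 + st.2.2 * (length - st.2.1) - PySem.Int.floordiv (st.2.2 * (st.2.2 - 1)) 2

-- ===== PRECONDITION & SPEC =====
def Spec_calc_part_1_line (line : String) (length : Int) (out : Int) : Prop := out = calc_part_1_line_alt line length
instance (line : String) (length : Int) (out : Int) : Decidable (Spec_calc_part_1_line line length out) := by unfold Spec_calc_part_1_line; infer_instance

-- ===== CLAIM (what is proved, stated in full; the proofs are below) =====
def Claim_equal_calc_part_1_line : Prop := ∀ (line : String) (length : Int), Dom_calc_part_1_line line length → Spec_calc_part_1_line line length (calc_part_1_line line length)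

-- ===== LEMMAS AND PROOFS =====

-- exact integer division: ((c+1)*c)//2 = (c*(c-1))//2 + c
lemma pv_fd_step (c : Int) :
    PySem.Int.floordiv ((c + 1) * c) 2 = PySem.Int.floordiv (c * (c - 1)) 2 + c := by
  rw [PySem.Int.floordiv_eq_ediv_of_pos (by norm_num), PySem.Int.floordiv_eq_ediv_of_pos (by norm_num)]
  have h : (c + 1) * c = c * (c - 1) + c * 2 := by ring
  rw [h, Int.add_mul_ediv_right _ _ (by norm_num : (2:Int) ≠ 0)]

-- loop invariant: A's state (sum, rock_at) corresponds to B's (total, s, c) via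
-- sum = total + c*(length-s) - c*(c-1)//2 and rock_at = length - s - c
lemma pv_loop (length : Int) (l : List Char) : ∀ (i tot s c : Int),
    ((PySem.List.enumerate l i).foldl
      (fun (st : Int × Int) p =>
        if p.2 == '#' then
          (st.1, length - 1 - p.1)
        else if p.2 == 'O' then
          (st.1 + st.2, st.2 - 1)
        else st)
      (tot + c * (length - s) - PySem.Int.floordiv (c * (c - 1)) 2, length - s - c)).1
    =
    (let st := (PySem.List.enumerate l i).foldl
      (fun (st : Int × Int × Int) p =>
        if p.2 == '#' then
          (st.1 + st.2.2 * (length - st.2.1) - PySem.Int.floordiv (st.2.2 * (st.2.2 - 1)) 2,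
           p.1 + 1, 0)
        else if p.2 == 'O' then
          (st.1, st.2.1, st.2.2 + 1)
        else st)
      (tot, s, c)
     st.1 + st.2.2 * (length - st.2.1) - PySem.Int.floordiv (st.2.2 * (st.2.2 - 1)) 2) := by
  induction l with
  | nil => intro i tot s c; simp [PySem.List.enumerate]
  | cons ch t ih =>
    intro i tot s c
    rw [PySem.List.enumerate_cons]
    simp only [List.foldl_cons]
    by_cases h1 : ch = '#'
    · simp only [h1, beq_self_eq_true]
      have hst : (tot + c * (length - s) - PySem.Int.floordiv (c * (c - 1)) 2, length - 1 - i)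
          = ((tot + c * (length - s) - PySem.Int.floordiv (c * (c - 1)) 2)
              + 0 * (length - (i + 1)) - PySem.Int.floordiv ((0:Int) * (0 - 1)) 2,
             length - (i + 1) - 0) := by
        simp only [Prod.mk.injEq]
        constructor
        · have h0 : PySem.Int.floordiv ((0:Int) * (0 - 1)) 2 = 0 := by decide
          rw [h0]; ring
        · ring
      rw [hst]
      exact ih (i + 1) (tot + c * (length - s) - PySem.Int.floordiv (c * (c - 1)) 2) (i + 1) 0
    · by_cases h2 : ch = 'O'
      · simp only [h2, beq_self_eq_true]
        have hst : (tot + c * (length - s) - PySem.Int.floordiv (c * (c - 1)) 2 + (length - s - c),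
              length - s - c - 1)
            = (tot + (c + 1) * (length - s) - PySem.Int.floordiv ((c + 1) * ((c + 1) - 1)) 2,
               length - s - (c + 1)) := by
          simp only [Prod.mk.injEq]
          constructor
          · have e1 : (c + 1) * ((c + 1) - 1) = (c + 1) * c := by ring
            rw [e1, pv_fd_step]; ring
          · ring
        rw [hst]
        exact ih (i + 1) tot s (c + 1)
      · have hne1 : (ch == '#') = false := by simp [h1]
        have hne2 : (ch == 'O') = false := by simp [h2]
        simp only [hne1, hne2, Bool.false_eq_true, if_false]
        exact ih (i + 1) tot s c

-- ===== VERDICT (by name: the statement is the Claim_ definition above) =====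
theorem calc_part_1_line_spec : Claim_equal_calc_part_1_line := by
  intro line length _
  unfold Spec_calc_part_1_line calc_part_1_line calc_part_1_line_alt
  have := pv_loop length line.toList 0 0 0 0
  simpa using this
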